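-- pv_equiv track=rewrite | github.com/pypi-data/pypi-mirror-401 | packages/justhtml/justhtml-0.34.0.tar.gz/justhtml-0.34.0/src/justhtml/node.py | _markdown_escape_text
-- ===== SOURCE A (Python) =====
-- def _markdown_escape_text(s: str) -> str:
--     if not s:
--         return ""
--     # Pragmatic: escape the few characters that commonly change Markdown meaning.
--     # Keep this minimal to preserve readability.
--     out: list[str] = []
--     for ch in s:
--         if ch in "\\`*_[]":
--             out.append("\\")
--         out.append(ch)
--     return "".join(out)
-- ===== SOURCE B (Python) =====
-- import re
--
-- _MD_ESCAPE_RE = re.compile(r"([\\`*_\[\]])")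
--
-- def _markdown_escape_text(s: str) -> str:
--     return _MD_ESCAPE_RE.sub(r"\\\1", s)
-- ===== Notes on version B (the rewrite author's own statement) =====
-- stated objective: idiomatic
-- what changed: Replaced the explicit per-character loop with list accumulator and join by a single precompiled regex substitution that inserts a backslash before each of the six Markdown special characters.
import Mathlib
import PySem

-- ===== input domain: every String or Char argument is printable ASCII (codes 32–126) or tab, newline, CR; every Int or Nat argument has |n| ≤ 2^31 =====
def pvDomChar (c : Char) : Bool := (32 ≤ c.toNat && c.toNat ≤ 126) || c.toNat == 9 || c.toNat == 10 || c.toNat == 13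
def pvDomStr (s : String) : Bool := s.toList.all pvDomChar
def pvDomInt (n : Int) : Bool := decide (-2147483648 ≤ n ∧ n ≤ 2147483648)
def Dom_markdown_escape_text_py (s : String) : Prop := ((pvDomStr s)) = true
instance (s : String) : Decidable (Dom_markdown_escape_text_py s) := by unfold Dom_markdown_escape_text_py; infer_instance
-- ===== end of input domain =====

-- ===== PORT A =====
-- B replaces the per-character loop/join with one regex substitution; same return value.
def markdown_escape_text_py (s : String) : String :=
  if s = "" then ""
  else
    String.join
      ((s.toList).foldl
        (fun (out : List String) (ch : Char) =>
          (if ch ∈ "\\`*_[]".toList then out ++ ["\\"] else out) ++ [String.ofList [ch]])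
        [])

-- ===== PORT B =====
-- re.sub with the character class [\\`*_\[\]] and replacement '\\\1': each matched
-- character is replaced by a backslash followed by itself; ported exactly as that
-- per-match substitution over the string.
def mdSpecial : List Char := ['\\', '`', '*', '_', '[', ']']

def markdown_escape_text_py_alt (s : String) : String :=
  String.ofList ((s.toList).flatMap (fun ch => if ch ∈ mdSpecial then ['\\', ch] else [ch]))

-- ===== PRECONDITION & SPEC =====
def Spec_markdown_escape_text_py (s : String) (out : String) : Prop := out = markdown_escape_text_py_alt s
instance (s : String) (out : String) : Decidable (Spec_markdown_escape_text_py s out) := by unfold Spec_markdown_escape_text_py; infer_instance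

-- ===== CLAIM (what is proved, stated in full; the proofs are below) =====
def Claim_equal_markdown_escape_text_py : Prop := ∀ (s : String), Dom_markdown_escape_text_py s → Spec_markdown_escape_text_py s (markdown_escape_text_py s)

-- ===== LEMMAS AND PROOFS =====

-- ===== VERDICT (by name: the statement is the Claim_ definition above) =====
theorem md_join_foldl (l : List Char) (acc : List String) :
    String.join
      (l.foldl
        (fun (out : List String) (ch : Char) =>
          (if ch ∈ "\\`*_[]".toList then out ++ ["\\"] else out) ++ [String.ofList [ch]])
        acc)
    = String.join acc ++ String.ofList (l.flatMap (fun ch => if ch ∈ mdSpecial then ['\\', ch] else [ch])) := by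
  induction l generalizing acc with
  | nil => simp [String.join]
  | cons ch t ih =>
    simp only [List.foldl_cons, List.flatMap_cons, ih]
    have hs : "\\`*_[]".toList = mdSpecial := by decide
    rw [hs]
    by_cases hc : ch ∈ mdSpecial
    · apply String.toList_injective
      simp [hc, String.toList_ofList]
    · apply String.toList_injective
      simp [hc, String.toList_ofList]

theorem markdown_escape_text_py_spec : Claim_equal_markdown_escape_text_py := by
  intro s _
  unfold Spec_markdown_escape_text_py markdown_escape_text_py markdown_escape_text_py_alt
  by_cases h : s = ""
  · subst h; decide
  · simp only [h, if_false]
    rw [md_join_foldl s.toList []]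
    simp [String.join]
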